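-- pv_equiv track=rewrite | github.com/JoanPAAL/extend_orfs | EXTEND_ORFS/PACKAGES/FOR_GIT_HUB/extend_orfs/extend_orfs.py | find_upstream_patterns
-- ===== SOURCE A (Python) =====
-- def find_upstream_patterns(seq, starts, stops):
--
--     """Find Stop and Start Codons in ext5
--     Output is the leftmost start codon downstream of the rightmost stop codon
--     Iterate backwards modifying t_i with the position of each start codon
--     encountered. As one iterates backwards, when one finds the first stop codon
--     it is sure it is the rightmost, so the last start codon encountered must be
--     the leftmost to the right of that stop codon.
--     If a stop codon is found before encountering any start codon, it returns
--     the position of the stop codon.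
--     If default_full is True, returns full sequence if pattern is not found.
--     """
--
--     start_i = -1 #Start Index
--
--     for i in range(len(seq),0,-3): #-3 so iteration goes backwards 3 nt
--         if seq[i-3:i] in starts:
--             start_i = i - 3 #So extension includes the Start Codon
--
--         elif seq[i-3:i] in stops and start_i != -1:
--             return start_i # A stop codon has been found.
--                            # Return the last start position stored
--                            # before the stop codon
--
--         elif seq[i-3:i] in stops:
--             return i - 3 # A stop was found before any start codon.
--                               # Return stop position
--
--     return start_i #No match found. -1 so the resulting column can be numerical
-- ===== SOURCE B (Python) =====
-- def find_upstream_patterns(seq, starts, stops):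
--     """Two-phase re-implementation: materialise the right-anchored codons,
--     find the rightmost pure stop codon, then take the leftmost start to its
--     right (a codon that is both a start and a stop counts as a start)."""
--     items = [(i - 3, seq[i - 3:i]) for i in range(len(seq), 0, -3)]
--
--     def leftmost_start(its):
--         for q, d in reversed(its):
--             if d in starts:
--                 return q
--         return -1
--
--     right = []  # codons strictly to the right of the scan point (right-to-left)
--     for p, c in items:
--         if c in stops and c not in starts:
--             s = leftmost_start(right)
--             return s if s != -1 else p
--         right.append((p, c))
--     return leftmost_start(right)
-- ===== Notes on version B (the rewrite author's own statement) =====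
-- stated objective: alternative
-- what changed: Replaces A's single fused backward loop carrying a mutable start index with a two-phase decomposition: materialise the right-anchored codon list, find the rightmost pure stop codon (start-over-stop priority preserved by requiring 'not a start'), then a separate directed pass returns the leftmost start codon to its right.
import Mathlib
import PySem

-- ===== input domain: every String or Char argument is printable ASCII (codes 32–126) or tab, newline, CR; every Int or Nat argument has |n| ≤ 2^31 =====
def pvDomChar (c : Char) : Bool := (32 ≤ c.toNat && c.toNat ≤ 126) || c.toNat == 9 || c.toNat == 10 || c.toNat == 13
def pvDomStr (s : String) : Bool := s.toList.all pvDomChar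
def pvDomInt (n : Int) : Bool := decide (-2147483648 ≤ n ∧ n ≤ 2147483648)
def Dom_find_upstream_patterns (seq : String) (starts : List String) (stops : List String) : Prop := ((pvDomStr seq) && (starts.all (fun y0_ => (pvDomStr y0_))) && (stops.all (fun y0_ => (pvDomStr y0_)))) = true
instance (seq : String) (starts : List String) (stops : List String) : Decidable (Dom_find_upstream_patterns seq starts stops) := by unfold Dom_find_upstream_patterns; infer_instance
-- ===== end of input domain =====

-- B replaces A's single fused backward loop with a two-phase decomposition
-- (find the rightmost pure stop codon, then the leftmost start to its right);
-- objective: alternative structure, same cost.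

-- ===== PORT A =====
-- A's backward for-loop with early returns; start_i is the mutable accumulator.
def fupA_loop (seq : String) (starts stops : List String) : List Int → Int → Int
  | [], start_i => start_i
  | i :: rest, start_i =>
    if starts.contains (PySem.Str.slice seq (some (i - 3)) (some i)) then
      fupA_loop seq starts stops rest (i - 3)
    else if stops.contains (PySem.Str.slice seq (some (i - 3)) (some i)) && start_i != -1 then
      start_i
    else if stops.contains (PySem.Str.slice seq (some (i - 3)) (some i)) then
      i - 3
    else
      fupA_loop seq starts stops rest start_i

def find_upstream_patterns (seq : String) (starts : List String) (stops : List String) : Int :=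
  fupA_loop seq starts stops (PySem.List.pyRange (PySem.Str.len seq) 0 (-3)) (-1)

-- ===== PORT B =====
-- `for q, d in reversed(its): if d in starts: return q / return -1`
def fupB_leftmost (starts : List String) (its : List (Int × String)) : Int :=
  match its.reverse.find? (fun qd => starts.contains qd.2) with
  | some qd => qd.1
  | none => -1

-- the scan over `items` accumulating `right` (codons already passed, right-to-left)
def fupB_scan (starts stops : List String) : List (Int × String) → List (Int × String) → Int
  | right, [] => fupB_leftmost starts right
  | right, (p, c) :: rest =>
    if stops.contains c && !starts.contains c then
      let s := fupB_leftmost starts right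
      if s != -1 then s else p
    else
      fupB_scan starts stops (right ++ [(p, c)]) rest

def find_upstream_patterns_alt (seq : String) (starts : List String) (stops : List String) : Int :=
  let items := (PySem.List.pyRange (PySem.Str.len seq) 0 (-3)).map
    (fun i => (i - 3, PySem.Str.slice seq (some (i - 3)) (some i)))
  fupB_scan starts stops [] items

-- ===== PRECONDITION & SPEC =====
def Spec_find_upstream_patterns (seq : String) (starts : List String) (stops : List String) (out : Int) : Prop := out = find_upstream_patterns_alt seq starts stops
instance (seq : String) (starts : List String) (stops : List String) (out : Int) : Decidable (Spec_find_upstream_patterns seq starts stops out) := by unfold Spec_find_upstream_patterns; infer_instance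

-- ===== CLAIM (what is proved, stated in full; the proofs are below) =====
def Claim_equal_find_upstream_patterns : Prop := ∀ (seq : String) (starts : List String) (stops : List String), Dom_find_upstream_patterns seq starts stops → Spec_find_upstream_patterns seq starts stops (find_upstream_patterns seq starts stops)

-- ===== LEMMAS AND PROOFS =====

-- appending a start codon to `right` makes it the element `reversed(right)` hits first
lemma fupB_leftmost_append_start (starts : List String) (right : List (Int × String))
    (p : Int) (c : String) (hc : c ∈ starts) :
    fupB_leftmost starts (right ++ [(p, c)]) = p := by
  simp [fupB_leftmost, List.find?, hc]

-- appending a non-start codon leaves the leftmost start unchanged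
lemma fupB_leftmost_append_not_start (starts : List String) (right : List (Int × String))
    (p : Int) (c : String) (hc : c ∉ starts) :
    fupB_leftmost starts (right ++ [(p, c)]) = fupB_leftmost starts right := by
  simp [fupB_leftmost, List.find?, hc]

-- invariant: A's accumulator start_i equals the leftmost start recorded in B's `right`
lemma fup_key (seq : String) (starts stops : List String) :
    ∀ (L : List Int) (right : List (Int × String)),
      fupA_loop seq starts stops L (fupB_leftmost starts right)
        = fupB_scan starts stops right
            (L.map (fun i => (i - 3, PySem.Str.slice seq (some (i - 3)) (some i)))) := by
  intro L
  induction L with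
  | nil => intro right; simp [fupA_loop, fupB_scan]
  | cons i rest ih =>
    intro right
    rw [List.map_cons]
    by_cases hst : PySem.Str.slice seq (some (i - 3)) (some i) ∈ starts
    · simp only [fupA_loop, fupB_scan, List.contains_eq_mem, hst, decide_true, if_true,
        Bool.not_true, Bool.and_false, Bool.false_eq_true, if_false, Bool.false_and, Bool.and_false]
      rw [← ih (right ++ [(i - 3, PySem.Str.slice seq (some (i - 3)) (some i))]),
        fupB_leftmost_append_start starts right _ _ hst]
    · by_cases hsp : PySem.Str.slice seq (some (i - 3)) (some i) ∈ stops
      · simp [fupA_loop, fupB_scan, hst, hsp]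
      · simp only [fupA_loop, fupB_scan, List.contains_eq_mem, hst, hsp, decide_false,
          Bool.false_eq_true, if_false, Bool.false_and, Bool.and_false]
        rw [← ih (right ++ [(i - 3, PySem.Str.slice seq (some (i - 3)) (some i))]),
          fupB_leftmost_append_not_start starts right _ _ hst]

-- ===== VERDICT (by name: the statement is the Claim_ definition above) =====
theorem find_upstream_patterns_spec : Claim_equal_find_upstream_patterns := by
  intro seq starts stops _
  show find_upstream_patterns seq starts stops = find_upstream_patterns_alt seq starts stops
  unfold find_upstream_patterns find_upstream_patterns_alt
  have h0 : (-1 : Int) = fupB_leftmost starts [] := rfl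
  rw [h0, fup_key]
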